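-- pv_equiv track=rewrite | github.com/Eric-Lpcr/AdventOfCode2022 | day08/day08.py | visible_trees
-- ===== SOURCE A (Python) =====
-- import operator
--
-- def visible_from_left(trees):
--     """Returns a bool array telling whether the tree is visible from the left side"""
--     highest_tree = ''
--     visible = []
--     for i, tree in enumerate(trees):
--         if tree > highest_tree:
--             visible.append(True)
--             highest_tree = tree
--         else:
--             visible.append(False)
--     return visible
--
-- def combine(list_of_lists_1, list_of_lists_2, binary_op):
--     """Apply binary_op element-wise on list of lists"""
--     visible = []
--     for line1, line2 in zip(list_of_lists_1, list_of_lists_2):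
--         visible.append([binary_op(e1, e2) for e1, e2 in zip(line1, line2)])
--     return visible
--
-- def visible_trees(forest):
--     visible_from_w = [visible_from_left(trees) for trees in forest]  # West view is trivial
--
--     visible_from_e = [list(reversed(visible_from_left(reversed(trees)))) for trees in forest]  # East needs reverse
--
--     # North view needs transposition of lines and columns
--     visible_from_n = [visible_from_left(trees) for trees in zip(*forest)]
--     visible_from_n = list(zip(*visible_from_n))  # transpose result back
--
--     # South view is reversed and transposed
--     visible_from_s = [list(reversed(visible_from_left(reversed(trees)))) for trees in zip(*forest)]
--     visible_from_s = list(zip(*visible_from_s))  # transpose result back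
--
--     visible = combine(visible_from_w, visible_from_e, operator.or_)
--     visible = combine(visible, visible_from_n, operator.or_)
--     visible = combine(visible, visible_from_s, operator.or_)
--     return visible
-- ===== SOURCE B (Python) =====
-- def visible_trees(forest):
--     # A tree is visible iff it is taller than the tallest tree on one of its
--     # four lines of sight; the grid's columns are given by zip(*forest).
--     out_cols = []
--     for j, col in enumerate(zip(*forest)):
--         out_cols.append([t > max(forest[i][:j], default='')
--                          or t > max(forest[i][j + 1:], default='')
--                          or t > max(col[:i], default='')
--                          or t > max(col[i + 1:], default='')
--                          for i, t in enumerate(col)])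
--     return [list(r) for r in zip(*out_cols)]
-- ===== Notes on version B (the rewrite author's own statement) =====
-- stated objective: alternative
-- what changed: Replaces A's four per-direction sweep pipelines (a running-maximum helper applied to rows, reversed rows and two zip(*) transposes, merged by three element-wise or-combines) with a single direct per-cell test: a tree is visible iff it is strictly taller than the tallest tree (max with default '') on one of its four lines of sight.
import Mathlib
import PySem

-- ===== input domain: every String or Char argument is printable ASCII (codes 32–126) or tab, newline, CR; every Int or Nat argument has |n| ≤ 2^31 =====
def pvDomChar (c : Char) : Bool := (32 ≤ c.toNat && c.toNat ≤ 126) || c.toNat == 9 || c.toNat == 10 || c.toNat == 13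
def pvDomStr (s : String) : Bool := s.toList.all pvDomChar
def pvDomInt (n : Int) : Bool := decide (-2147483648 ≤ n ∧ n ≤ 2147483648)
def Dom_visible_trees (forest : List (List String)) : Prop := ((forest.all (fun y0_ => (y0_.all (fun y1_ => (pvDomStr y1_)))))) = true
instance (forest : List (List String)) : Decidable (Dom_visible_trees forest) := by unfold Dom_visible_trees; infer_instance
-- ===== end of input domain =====

-- B replaces A's four per-direction sweep pipelines (helper over rows, reversed rows, two zip(*)
-- transposes, three element-wise combines) with one direct per-cell test: a tree is visible iff
-- it is taller than the tallest tree on one of its four lines of sight.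

-- ===== PORT A =====
-- visible_from_left: loop with running 'highest_tree' (starts at ''), strict '>' on strings
def pvVflAux (highest : String) : List String → List Bool
  | [] => []
  | t :: rest => if highest < t then true :: pvVflAux t rest else false :: pvVflAux highest rest

def pvVfl (trees : List String) : List Bool := pvVflAux "" trees

-- zip(*l): Python's zip truncates to the shortest row (min-length fold, then column picks);
-- shared by both ports, since both Pythons call the builtin zip(*...)
def pvZipStar {α : Type} (d : α) (l : List (List α)) : List (List α) :=
  match l with
  | [] => []
  | r :: rs =>
      (List.range (rs.foldl (fun m row => min m row.length) r.length)).map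
        (fun j => (r :: rs).map (fun row => row.getD j d))

-- combine(l1, l2, operator.or_): element-wise OR over zipped lists of lists
def pvCombine (l1 l2 : List (List Bool)) : List (List Bool) :=
  (l1.zip l2).map (fun p => (p.1.zip p.2).map (fun q => q.1 || q.2))

def visible_trees (forest : List (List String)) : List (List Bool) :=
  let vw := forest.map pvVfl
  let ve := forest.map (fun trees => (pvVfl trees.reverse).reverse)
  let vn := pvZipStar false ((pvZipStar "" forest).map pvVfl)
  let vs := pvZipStar false ((pvZipStar "" forest).map (fun trees => (pvVfl trees.reverse).reverse))
  pvCombine (pvCombine (pvCombine vw ve) vn) vs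

-- ===== PORT B =====
-- max(l, default=d) ported by hand as a running-maximum fold: Python's max returns the first
-- maximal element; on a total order (strings) the returned VALUE equals this fold's result,
-- so the port is value-exact.
def pvMaxD (l : List String) (d : String) : String :=
  match l with
  | [] => d
  | x :: xs => xs.foldl (fun a y => if a < y then y else a) x

def visible_trees_alt (forest : List (List String)) : List (List Bool) :=
  let outCols := (pvZipStar "" forest).zipIdx.map (fun q =>
    q.1.zipIdx.map (fun p =>
      decide (pvMaxD ((forest.getD p.2 []).take q.2) "" < p.1) ||
      decide (pvMaxD ((forest.getD p.2 []).drop (q.2 + 1)) "" < p.1) ||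
      decide (pvMaxD (q.1.take p.2) "" < p.1) ||
      decide (pvMaxD (q.1.drop (p.2 + 1)) "" < p.1)))
  pvZipStar false outCols

-- ===== PRECONDITION & SPEC =====
def Spec_visible_trees (forest : List (List String)) (out : List (List Bool)) : Prop :=
  out = visible_trees_alt forest
instance (forest : List (List String)) (out : List (List Bool)) : Decidable (Spec_visible_trees forest out) := by
  unfold Spec_visible_trees; infer_instance

-- ===== CLAIM (what is proved, stated in full; the proofs are below) =====
def Claim_equal_visible_trees : Prop := ∀ (forest : List (List String)), Dom_visible_trees forest → Spec_visible_trees forest (visible_trees forest)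

-- ===== LEMMAS AND PROOFS =====

-- per-cell directional tests (proof-side abbreviations)
def pvCol (F : List (List String)) (j : Nat) : List String := F.map (fun row => row.getD j "")

def pvWt (F : List (List String)) (i j : Nat) : Bool :=
  decide ("" < (F.getD i []).getD j "") &&
    ((F.getD i []).take j).all (fun u => decide (u < (F.getD i []).getD j ""))

def pvEt (F : List (List String)) (i j : Nat) : Bool :=
  decide ("" < (F.getD i []).getD j "") &&
    ((F.getD i []).drop (j + 1)).all (fun u => decide (u < (F.getD i []).getD j ""))

def pvNt (F : List (List String)) (i j : Nat) : Bool :=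
  decide ("" < (pvCol F j).getD i "") &&
    ((pvCol F j).take i).all (fun u => decide (u < (pvCol F j).getD i ""))

def pvSt (F : List (List String)) (i j : Nat) : Bool :=
  decide ("" < (pvCol F j).getD i "") &&
    ((pvCol F j).drop (i + 1)).all (fun u => decide (u < (pvCol F j).getD i ""))

theorem pvVflAux_length (h : String) (l : List String) : (pvVflAux h l).length = l.length := by
  induction l generalizing h with
  | nil => rfl
  | cons t rest ih => simp only [pvVflAux]; split <;> simp [ih]

-- the running-highest loop, characterised per index
theorem pvVflAux_getElem (l : List String) (h : String) (j : Nat) (hj : j < l.length) :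
    (pvVflAux h l)[j]'(by rw [pvVflAux_length]; exact hj) =
      (decide (h < l[j]) && (l.take j).all (fun u => decide (u < l[j]))) := by
  induction l generalizing h j with
  | nil => simp at hj
  | cons t rest ih =>
    cases j with
    | zero => simp only [pvVflAux]; split <;> simp_all
    | succ j =>
      have hj' : j < rest.length := by simpa using hj
      simp only [pvVflAux]
      split <;>
        simp only [List.getElem_cons_succ, List.take_succ_cons, List.all_cons, ih _ _ hj'] <;>
        rename_i hc
      · by_cases h1 : t < rest[j]
        · have h2 : h < rest[j] := lt_trans hc h1
          simp [h1, h2]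
        · simp [h1]
      · by_cases h2 : h < rest[j]
        · have h1 : t < rest[j] := lt_of_le_of_lt (not_lt.mp hc) h2
          simp [h1, h2]
        · simp [h2]

theorem pvVfl_range (l : List String) :
    pvVfl l = (List.range l.length).map (fun j =>
      decide ("" < l.getD j "") && (l.take j).all (fun u => decide (u < l.getD j ""))) := by
  apply List.ext_getElem
  · simp [pvVfl, pvVflAux_length]
  · intro j h1 h2
    have hj : j < l.length := by simpa [pvVfl, pvVflAux_length] using h1
    simp only [pvVfl, pvVflAux_getElem l "" j hj, List.getElem_map, List.getElem_range,
      List.getD_eq_getElem l "" hj]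

theorem pvVflRev_range (l : List String) :
    (pvVfl l.reverse).reverse = (List.range l.length).map (fun j =>
      decide ("" < l.getD j "") && (l.drop (j + 1)).all (fun u => decide (u < l.getD j ""))) := by
  apply List.ext_getElem
  · simp [pvVfl, pvVflAux_length]
  · intro j h1 h2
    have hj : j < l.length := by simpa [pvVfl, pvVflAux_length] using h1
    have hlen : (pvVfl l.reverse).length = l.length := by simp [pvVfl, pvVflAux_length]
    rw [List.getElem_reverse]
    rw [show ((pvVfl l.reverse)[(pvVfl l.reverse).length - 1 - j]'(by rw [hlen]; omega) =
        (pvVfl l.reverse)[l.length - 1 - j]'(by rw [hlen]; omega)) from by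
      congr 1
      simp [hlen]]
    simp only [pvVfl, pvVflAux_getElem l.reverse "" (l.length - 1 - j)
      (by rw [List.length_reverse]; omega)]
    have hrev : l.reverse[l.length - 1 - j]'(by rw [List.length_reverse]; omega) = l[j] := by
      rw [List.getElem_reverse]
      congr 1
      omega
    rw [hrev]
    have htake : l.reverse.take (l.length - 1 - j) = (l.drop (j + 1)).reverse := by
      rw [List.take_reverse]
      congr 2
      omega
    rw [htake, List.all_reverse]
    simp [List.getElem_map, List.getElem_range, List.getD_eq_getElem?_getD,
      List.getElem?_eq_getElem hj]

theorem pvVfl_length (l : List String) : (pvVfl l).length = l.length := pvVflAux_length "" l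

theorem pvZipStar_cols (r0 : List String) (rs : List (List String)) :
    pvZipStar "" (r0 :: rs) =
      (List.range (rs.foldl (fun m row => min m row.length) r0.length)).map
        (fun j => pvCol (r0 :: rs) j) := rfl

theorem pvList_eq_range_getD {α : Type} (l : List α) (d : α) :
    l = (List.range l.length).map (fun i => l.getD i d) := by
  apply List.ext_getElem
  · simp
  · intro i h1 h2
    simp [List.getElem?_eq_getElem h1]

theorem pvZipRangeMap {α β : Type} (a b : Nat) (f : Nat → α) (g : Nat → β) :
    ((List.range a).map f).zip ((List.range b).map g) =
      (List.range (min a b)).map (fun j => (f j, g j)) := by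
  apply List.ext_getElem
  · simp
  · intro j h1 h2
    simp [List.getElem_zip]

theorem pvCombine_range2 (R : Nat) (C1 C2 : Nat → Nat) (f g : Nat → Nat → Bool) :
    pvCombine ((List.range R).map (fun i => (List.range (C1 i)).map (f i)))
              ((List.range R).map (fun i => (List.range (C2 i)).map (g i))) =
      (List.range R).map (fun i =>
        (List.range (min (C1 i) (C2 i))).map (fun j => f i j || g i j)) := by
  simp only [pvCombine, List.zip_map', List.map_map]
  apply List.map_congr_left
  intro i _
  simp only [Function.comp]
  rw [pvZipRangeMap, List.map_map]
  rfl

theorem pvW_eq (F : List (List String)) :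
    F.map pvVfl = (List.range F.length).map (fun i =>
      (List.range (F.getD i []).length).map (fun j => pvWt F i j)) := by
  conv_lhs => rw [pvList_eq_range_getD F [], List.map_map]
  apply List.map_congr_left
  intro i hi
  simp only [Function.comp]
  rw [pvVfl_range]
  rfl

theorem pvE_eq (F : List (List String)) :
    F.map (fun trees => (pvVfl trees.reverse).reverse) =
      (List.range F.length).map (fun i =>
        (List.range (F.getD i []).length).map (fun j => pvEt F i j)) := by
  conv_lhs => rw [pvList_eq_range_getD F [], List.map_map]
  apply List.map_congr_left
  intro i hi
  simp only [Function.comp]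
  rw [pvVflRev_range]
  rfl

theorem pvFoldlMinAux {α : Type} (l : List (List α)) :
    ∀ a : Nat, l.foldl (fun m row => min m row.length) a ≤ a := by
  induction l with
  | nil => intro a; simp
  | cons r rs ih => intro a; exact le_trans (ih (min a r.length)) (min_le_left _ _)

theorem pvFoldMin_le_mem {α : Type} (l : List (List α)) (r : List α) (hr : r ∈ l) :
    ∀ (a : Nat), l.foldl (fun m row => min m row.length) a ≤ r.length := by
  induction l with
  | nil => simp at hr
  | cons x xs ih =>
    intro a
    rcases List.mem_cons.mp hr with rfl | hmem
    · exact le_trans (pvFoldlMinAux xs (min a r.length)) (min_le_right _ _)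
    · exact ih hmem (min a x.length)

theorem pvFold_le_row (r0 : List String) (rs : List (List String)) (i : Nat)
    (hi : i < (r0 :: rs).length) :
    rs.foldl (fun m row => min m row.length) r0.length ≤ ((r0 :: rs).getD i []).length := by
  rw [List.getD_eq_getElem _ _ hi]
  cases i with
  | zero => exact pvFoldlMinAux rs r0.length
  | succ n =>
    rw [List.getElem_cons_succ]
    exact pvFoldMin_le_mem rs _ (List.getElem_mem _) r0.length

theorem pvFoldlMin {α : Type} (C : Nat) (l : List (List α)) (h : ∀ r ∈ l, r.length = C) :
    l.foldl (fun m row => min m row.length) C = C := by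
  induction l with
  | nil => rfl
  | cons r rs ih =>
      simp only [List.foldl_cons, h r (by simp), min_self]
      exact ih (fun r hr => h r (by simp [hr]))

theorem pvZipStar_rect {α : Type} (d : α) (l : List (List α)) (C : Nat)
    (hne : l ≠ []) (h : ∀ r ∈ l, r.length = C) :
    pvZipStar d l = (List.range C).map (fun j => l.map (fun row => row.getD j d)) := by
  cases l with
  | nil => exact absurd rfl hne
  | cons r rs =>
      simp only [pvZipStar]
      rw [show r.length = C from h r (by simp),
        pvFoldlMin C rs (fun x hx => h x (by simp [hx]))]

theorem pvN_eq (r0 : List String) (rs : List (List String))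
    (hm : 0 < rs.foldl (fun m row => min m row.length) r0.length) :
    pvZipStar false ((pvZipStar "" (r0 :: rs)).map pvVfl) =
      (List.range (r0 :: rs).length).map (fun i =>
        (List.range (rs.foldl (fun m row => min m row.length) r0.length)).map
          (fun j => pvNt (r0 :: rs) i j)) := by
  rw [show pvZipStar "" (r0 :: rs) =
      (List.range (rs.foldl (fun m row => min m row.length) r0.length)).map
        (fun j => (r0 :: rs).map (fun row => row.getD j "")) from rfl,
    List.map_map]
  rw [pvZipStar_rect false _ (r0 :: rs).length
      (by simp [List.range_eq_nil]; omega)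
      (by
        intro r hr
        rcases List.mem_map.mp hr with ⟨j, _, rfl⟩
        simp [Function.comp, pvVfl_length])]
  apply List.map_congr_left
  intro i hi
  have hiR : i < (r0 :: rs).length := List.mem_range.mp hi
  rw [List.map_map]
  apply List.map_congr_left
  intro j hj
  simp only [Function.comp]
  rw [pvVfl_range]
  rw [List.getD_eq_getElem _ _ (by simpa using hiR), List.getElem_map, List.getElem_range]
  rfl

theorem pvS_eq (r0 : List String) (rs : List (List String))
    (hm : 0 < rs.foldl (fun m row => min m row.length) r0.length) :
    pvZipStar false ((pvZipStar "" (r0 :: rs)).map (fun trees => (pvVfl trees.reverse).reverse)) =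
      (List.range (r0 :: rs).length).map (fun i =>
        (List.range (rs.foldl (fun m row => min m row.length) r0.length)).map
          (fun j => pvSt (r0 :: rs) i j)) := by
  rw [show pvZipStar "" (r0 :: rs) =
      (List.range (rs.foldl (fun m row => min m row.length) r0.length)).map
        (fun j => (r0 :: rs).map (fun row => row.getD j "")) from rfl,
    List.map_map]
  rw [pvZipStar_rect false _ (r0 :: rs).length
      (by simp [List.range_eq_nil]; omega)
      (by
        intro r hr
        rcases List.mem_map.mp hr with ⟨j, _, rfl⟩
        simp [Function.comp, pvVfl_length])]
  apply List.map_congr_left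
  intro i hi
  have hiR : i < (r0 :: rs).length := List.mem_range.mp hi
  rw [List.map_map]
  apply List.map_congr_left
  intro j hj
  simp only [Function.comp]
  rw [pvVflRev_range]
  rw [List.getD_eq_getElem _ _ (by simpa using hiR), List.getElem_map, List.getElem_range]
  rfl

-- A on any forest whose zip(*) width is positive, as an index grid
theorem pvA_grid (r0 : List String) (rs : List (List String))
    (hm : 0 < rs.foldl (fun m row => min m row.length) r0.length) :
    visible_trees (r0 :: rs) = (List.range (r0 :: rs).length).map (fun i =>
      (List.range (rs.foldl (fun m row => min m row.length) r0.length)).map (fun j =>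
        ((pvWt (r0 :: rs) i j || pvEt (r0 :: rs) i j) || pvNt (r0 :: rs) i j)
          || pvSt (r0 :: rs) i j)) := by
  show pvCombine (pvCombine (pvCombine ((r0 :: rs).map pvVfl)
      ((r0 :: rs).map (fun trees => (pvVfl trees.reverse).reverse)))
      (pvZipStar false ((pvZipStar "" (r0 :: rs)).map pvVfl)))
      (pvZipStar false ((pvZipStar "" (r0 :: rs)).map
        (fun trees => (pvVfl trees.reverse).reverse))) = _
  rw [pvW_eq, pvE_eq, pvN_eq r0 rs hm, pvS_eq r0 rs hm,
    pvCombine_range2, pvCombine_range2, pvCombine_range2]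
  apply List.map_congr_left
  intro i hi
  have hiR : i < (r0 :: rs).length := List.mem_range.mp hi
  have hrow := pvFold_le_row r0 rs i hiR
  rw [show min (min (min ((r0 :: rs).getD i []).length ((r0 :: rs).getD i []).length)
        (rs.foldl (fun m row => min m row.length) r0.length))
        (rs.foldl (fun m row => min m row.length) r0.length)
      = rs.foldl (fun m row => min m row.length) r0.length from by omega]

-- ------- B side -------

theorem pvNotLtEmpty (u : String) : ¬ (u < "") := by
  simp [String.lt_iff_toList_lt]

theorem pvZipIdx_getD {α : Type} (l : List α) (d : α) :
    l.zipIdx = (List.range l.length).map (fun i => (l.getD i d, i)) := by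
  apply List.ext_getElem
  · simp
  · intro i h1 h2
    have hi : i < l.length := by simpa using h1
    simp [List.getElem_zipIdx, List.getD_eq_getElem?_getD, List.getElem?_eq_getElem hi]

theorem pvFoldMax_lt (l : List String) : ∀ (a t : String),
    (l.foldl (fun a x => if a < x then x else a) a < t) ↔ (a < t ∧ ∀ u ∈ l, u < t) := by
  induction l with
  | nil => intro a t; simp
  | cons x xs ih =>
    intro a t
    simp only [List.foldl_cons, ih, List.mem_cons]
    by_cases h : a < x
    · rw [if_pos h]
      constructor
      · rintro ⟨hx, hall⟩
        exact ⟨lt_trans h hx, fun u hu => hu.elim (fun e => e ▸ hx) (hall u)⟩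
      · rintro ⟨ha, hall⟩
        exact ⟨hall x (Or.inl rfl), fun u hu => hall u (Or.inr hu)⟩
    · rw [if_neg h]
      have hxa : x ≤ a := not_lt.mp h
      constructor
      · rintro ⟨ha, hall⟩
        exact ⟨ha, fun u hu => hu.elim (fun e => e ▸ lt_of_le_of_lt hxa ha) (hall u)⟩
      · rintro ⟨ha, hall⟩
        exact ⟨ha, fun u hu => hall u (Or.inr hu)⟩

theorem pvDecideBall (l : List String) (t : String) :
    decide (∀ u ∈ l, u < t) = l.all (fun u => decide (u < t)) := by
  induction l with
  | nil => simp
  | cons x xs ih =>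
    rw [decide_eq_decide.mpr (List.forall_mem_cons (p := fun u => u < t)), List.all_cons, ← ih]
    exact Bool.decide_and _ _

-- 'taller than the tallest tree (default '')' = 'above '' and taller than every tree'
theorem pvMaxD_lt (l : List String) (t : String) :
    decide (pvMaxD l "" < t)
      = (decide ("" < t) && l.all (fun u => decide (u < t))) := by
  have hiff : (pvMaxD l "" < t) ↔ ("" < t ∧ ∀ u ∈ l, u < t) := by
    cases l with
    | nil => simp [pvMaxD]
    | cons x xs =>
      show (xs.foldl (fun a y => if a < y then y else a) x < t) ↔ _
      rw [pvFoldMax_lt xs x t]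
      constructor
      · rintro ⟨hx, hall⟩
        have h0 : "" ≤ x := not_lt.mp (pvNotLtEmpty x)
        exact ⟨lt_of_le_of_lt h0 hx,
          fun u hu => (List.mem_cons.mp hu).elim (fun e => e ▸ hx) (hall u)⟩
      · rintro ⟨h0, hall⟩
        exact ⟨hall x (by simp), fun u hu => hall u (by simp [hu])⟩
  calc decide (pvMaxD l "" < t)
      = decide ("" < t ∧ ∀ u ∈ l, u < t) := decide_eq_decide.mpr hiff
    _ = (decide ("" < t) && l.all (fun u => decide (u < t))) := by
        rw [Bool.decide_and, pvDecideBall]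

theorem pvColGetD (F : List (List String)) (i j : Nat) (hi : i < F.length) :
    (pvCol F j).getD i "" = (F.getD i []).getD j "" := by
  simp only [pvCol]
  rw [List.getD_eq_getElem _ _ (by simpa using hi), List.getElem_map,
    List.getD_eq_getElem _ _ hi]

-- B on a forest with positive zip(*) width, as an index grid
theorem pvB_grid (r0 : List String) (rs : List (List String))
    (hm : 0 < rs.foldl (fun m row => min m row.length) r0.length) :
    visible_trees_alt (r0 :: rs) = (List.range (r0 :: rs).length).map (fun i =>
      (List.range (rs.foldl (fun m row => min m row.length) r0.length)).map (fun j =>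
        ((pvWt (r0 :: rs) i j || pvEt (r0 :: rs) i j) || pvNt (r0 :: rs) i j)
          || pvSt (r0 :: rs) i j)) := by
  have houtCols : ((pvZipStar "" (r0 :: rs)).zipIdx.map (fun q =>
      q.1.zipIdx.map (fun p =>
        decide (pvMaxD (((r0 :: rs).getD p.2 []).take q.2) "" < p.1) ||
        decide (pvMaxD (((r0 :: rs).getD p.2 []).drop (q.2 + 1)) "" < p.1) ||
        decide (pvMaxD (q.1.take p.2) "" < p.1) ||
        decide (pvMaxD (q.1.drop (p.2 + 1)) "" < p.1))))
      = (List.range (rs.foldl (fun m row => min m row.length) r0.length)).map (fun j =>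
          (List.range (r0 :: rs).length).map (fun i =>
            ((pvWt (r0 :: rs) i j || pvEt (r0 :: rs) i j) || pvNt (r0 :: rs) i j)
              || pvSt (r0 :: rs) i j)) := by
    rw [pvZipStar_cols r0 rs,
      pvZipIdx_getD ((List.range (rs.foldl (fun m row => min m row.length) r0.length)).map
        (fun j => pvCol (r0 :: rs) j)) ([] : List String)]
    simp only [List.length_map, List.length_range, List.map_map]
    apply List.map_congr_left
    intro j hj
    have hjW : j < rs.foldl (fun m row => min m row.length) r0.length := List.mem_range.mp hj
    have hcolj : ((List.range (rs.foldl (fun m row => min m row.length) r0.length)).map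
        (fun j => pvCol (r0 :: rs) j)).getD j [] = pvCol (r0 :: rs) j := by
      rw [List.getD_eq_getElem _ _ (by simpa using hjW), List.getElem_map, List.getElem_range]
    simp only [Function.comp, hcolj]
    rw [pvZipIdx_getD (pvCol (r0 :: rs) j) "",
      show (pvCol (r0 :: rs) j).length = (r0 :: rs).length from by simp [pvCol]]
    simp only [List.map_map]
    apply List.map_congr_left
    intro i hi
    have hiR : i < (r0 :: rs).length := List.mem_range.mp hi
    simp only [Function.comp, pvMaxD_lt, pvWt, pvEt, pvNt, pvSt, pvColGetD (r0 :: rs) i j hiR]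
  show pvZipStar false _ = _
  rw [houtCols]
  rw [pvZipStar_rect false _ (r0 :: rs).length
      (by simp [List.range_eq_nil]; omega)
      (by
        intro r hr
        rcases List.mem_map.mp hr with ⟨j, _, rfl⟩
        simp)]
  apply List.map_congr_left
  intro i hi
  have hiR : i < (r0 :: rs).length := List.mem_range.mp hi
  rw [List.map_map]
  apply List.map_congr_left
  intro j hj
  simp only [Function.comp]
  rw [List.getD_eq_getElem _ _ (by simpa using hiR), List.getElem_map, List.getElem_range]

-- A and B are both [] when zip(*) yields no columns
theorem pvA_w0 (r0 : List String) (rs : List (List String))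
    (h : rs.foldl (fun m row => min m row.length) r0.length = 0) :
    visible_trees (r0 :: rs) = [] := by
  have hz : pvZipStar "" (r0 :: rs) = [] := by
    simp only [pvZipStar]
    rw [h]
    rfl
  show pvCombine (pvCombine (pvCombine ((r0 :: rs).map pvVfl)
      ((r0 :: rs).map (fun trees => (pvVfl trees.reverse).reverse)))
      (pvZipStar false ((pvZipStar "" (r0 :: rs)).map pvVfl)))
      (pvZipStar false ((pvZipStar "" (r0 :: rs)).map
        (fun trees => (pvVfl trees.reverse).reverse))) = []
  rw [hz]
  simp [pvCombine, pvZipStar]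

theorem pvB_w0 (r0 : List String) (rs : List (List String))
    (h : rs.foldl (fun m row => min m row.length) r0.length = 0) :
    visible_trees_alt (r0 :: rs) = [] := by
  simp only [visible_trees_alt]
  rw [show pvZipStar "" (r0 :: rs) = [] from by
    simp only [pvZipStar]
    rw [h]
    rfl]
  rfl

-- ===== VERDICT (by name: the statement is the Claim_ definition above) =====
theorem visible_trees_spec : Claim_equal_visible_trees := by
  intro F _
  show visible_trees F = visible_trees_alt F
  cases F with
  | nil => rfl
  | cons r0 rs =>
    by_cases hm : 0 < rs.foldl (fun m row => min m row.length) r0.length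
    · rw [pvA_grid r0 rs hm, pvB_grid r0 rs hm]
    · rw [pvA_w0 r0 rs (by omega), pvB_w0 r0 rs (by omega)]
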